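-- pv_equiv track=rewrite | github.com/iabdul79/pyPlayground | slowQueenAttackSol.py | uMove
-- ===== SOURCE A (Python) =====
-- def uMove(n, qp, obs):
--   mv=0
--   i=qp[0]+1
--   j=qp[1]
--   while i<=n:
--     if findOb(i,j, obs):
--       return mv
--     else:
--       mv+=1
--     i+=1
--   return mv
--
-- def findOb(r,c,obs):
--   for o in obs:
--     if o[0] == r and o[1] == c:
--       return 1
--   return 0
-- ===== SOURCE B (Python) =====
-- def uMove(n, qp, obs):
--   r0 = qp[0]
--   c = qp[1]
--   blockers = [o[0] for o in obs if o[1] == c and r0 < o[0] <= n]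
--   if blockers:
--     return min(blockers) - r0 - 1
--   return max(n - r0, 0)
-- ===== Notes on version B (the rewrite author's own statement) =====
-- stated objective: simpler
-- what changed: Replaces the cell-by-cell upward walk with repeated full scans of obs by a single pass that collects the rows of blocking obstacles in the queen's column and returns min(blockers)-r0-1, or n-r0 (clamped at 0) when unblocked.
-- outside the precondition, e.g. on uMove(0, [5, 0], [[]]): A returns 0, B raises IndexError
import Mathlib
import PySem

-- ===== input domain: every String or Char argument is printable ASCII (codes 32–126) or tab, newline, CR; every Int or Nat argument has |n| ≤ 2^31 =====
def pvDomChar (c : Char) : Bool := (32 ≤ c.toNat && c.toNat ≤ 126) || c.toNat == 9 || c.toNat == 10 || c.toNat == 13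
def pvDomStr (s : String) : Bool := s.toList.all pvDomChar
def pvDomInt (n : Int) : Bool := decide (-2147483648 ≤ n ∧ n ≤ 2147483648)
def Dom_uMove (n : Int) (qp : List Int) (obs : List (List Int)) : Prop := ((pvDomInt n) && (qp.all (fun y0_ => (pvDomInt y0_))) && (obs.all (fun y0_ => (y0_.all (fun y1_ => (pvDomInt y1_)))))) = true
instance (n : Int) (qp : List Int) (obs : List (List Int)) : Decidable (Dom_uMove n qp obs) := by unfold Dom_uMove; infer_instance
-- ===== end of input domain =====

-- B replaces A's cell-by-cell upward walk (a full scan of obs per cell) by one pass over obs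
-- collecting the blocking rows in the queen's column: simpler and a single traversal.

-- ===== PORT A =====
def findOb (r c : Int) (obs : List (List Int)) : Int :=
  match obs with
  | [] => 0
  | o :: rest =>
      if PySem.List.pyGetD o 0 0 = r ∧ PySem.List.pyGetD o 1 0 = c then 1
      else findOb r c rest

def uMoveLoop (n c : Int) (obs : List (List Int)) (i mv : Int) : Int :=
  if _h : i ≤ n then
    if findOb i c obs ≠ 0 then mv
    else uMoveLoop n c obs (i + 1) (mv + 1)
  else mv
termination_by (n + 1 - i).toNat
decreasing_by omega

def uMove (n : Int) (qp : List Int) (obs : List (List Int)) : Int :=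
  uMoveLoop n (PySem.List.pyGetD qp 1 0) obs (PySem.List.pyGetD qp 0 0 + 1) 0

-- ===== PORT B =====
def uMove_alt (n : Int) (qp : List Int) (obs : List (List Int)) : Int :=
  match PySem.List.min?
      ((obs.filter (fun o =>
          PySem.List.pyGetD o 1 0 == PySem.List.pyGetD qp 1 0 &&
          (PySem.List.pyGetD qp 0 0 < PySem.List.pyGetD o 0 0 &&
           PySem.List.pyGetD o 0 0 ≤ n))).map
        (fun o => PySem.List.pyGetD o 0 0)) (fun x => x) with
  | some m => m - PySem.List.pyGetD qp 0 0 - 1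
  | none => max (n - PySem.List.pyGetD qp 0 0) 0

-- ===== PRECONDITION & SPEC =====
-- Pre_ excludes inputs where Python A raises IndexError (qp shorter than 2, or an obstacle
-- entry shorter than 2); it requires all obstacle entries to have length ≥ 2 even when the
-- loop never scans obs (queen already at or past row n), a corner on which A still returns.
def Pre_uMove (n : Int) (qp : List Int) (obs : List (List Int)) : Prop :=
  2 ≤ qp.length ∧ ∀ o ∈ obs, 2 ≤ o.length
instance (n : Int) (qp : List Int) (obs : List (List Int)) : Decidable (Pre_uMove n qp obs) := by
  unfold Pre_uMove; infer_instance

def pvWitness_uMove : Int × List Int × List (List Int) := (4, [1, 2], [[3, 2], [2, 4]])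

def Spec_uMove (n : Int) (qp : List Int) (obs : List (List Int)) (out : Int) : Prop := out = uMove_alt n qp obs
instance (n : Int) (qp : List Int) (obs : List (List Int)) (out : Int) : Decidable (Spec_uMove n qp obs out) := by unfold Spec_uMove; infer_instance

-- ===== CLAIM (what is proved, stated in full; the proofs are below) =====
def Claim_equal_uMove : Prop := ∀ (n : Int) (qp : List Int) (obs : List (List Int)), Dom_uMove n qp obs → Pre_uMove n qp obs → Spec_uMove n qp obs (uMove n qp obs)

-- ===== LEMMAS AND PROOFS =====

-- rows of obstacles in column c with i ≤ row ≤ n (B's blockers, parameterised by the lower bound)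
def blockersFrom (n c i : Int) (obs : List (List Int)) : List Int :=
  (obs.filter (fun o =>
      PySem.List.pyGetD o 1 0 == c &&
      (i ≤ PySem.List.pyGetD o 0 0 && PySem.List.pyGetD o 0 0 ≤ n))).map
    (fun o => PySem.List.pyGetD o 0 0)

-- the remaining move count as a function of the nearest blocker at or above row i
def upCount (n i : Int) (mo : Option Int) : Int :=
  match mo with
  | some m => m - i
  | none => max (n - i + 1) 0

theorem mem_blockersFrom {n c i x : Int} {obs : List (List Int)} :
    x ∈ blockersFrom n c i obs ↔
      ∃ o ∈ obs, PySem.List.pyGetD o 0 0 = x ∧ PySem.List.pyGetD o 1 0 = c ∧ i ≤ x ∧ x ≤ n := by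
  simp only [blockersFrom, List.mem_map, List.mem_filter, Bool.and_eq_true, beq_iff_eq,
    decide_eq_true_eq]
  constructor
  · rintro ⟨o, ⟨ho, h1, h2, h3⟩, rfl⟩
    exact ⟨o, ho, rfl, h1, h2, h3⟩
  · rintro ⟨o, ho, rfl, h1, h2, h3⟩
    exact ⟨o, ⟨ho, h1, h2, h3⟩, rfl⟩

theorem findOb_ne_zero_iff (r c : Int) (obs : List (List Int)) :
    findOb r c obs ≠ 0 ↔
      ∃ o ∈ obs, PySem.List.pyGetD o 0 0 = r ∧ PySem.List.pyGetD o 1 0 = c := by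
  induction obs with
  | nil => simp [findOb]
  | cons o rest ih =>
    by_cases h : PySem.List.pyGetD o 0 0 = r ∧ PySem.List.pyGetD o 1 0 = c
    · simp [findOb, h]
    · simp only [findOb, if_neg h, List.mem_cons, ih]
      constructor
      · rintro ⟨o', ho', hp⟩; exact ⟨o', Or.inr ho', hp⟩
      · rintro ⟨o', ho' | ho', hp⟩
        · exact absurd (ho' ▸ hp) h
        · exact ⟨o', ho', hp⟩

theorem loop_eq (n c : Int) (obs : List (List Int)) :
    ∀ (i mv : Int), uMoveLoop n c obs i mv =
      mv + upCount n i (PySem.List.min? (blockersFrom n c i obs) (fun x => x)) := by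
  intro i mv
  induction hk : (n + 1 - i).toNat using Nat.strong_induction_on generalizing i mv with
  | _ k ih =>
  by_cases hle : i ≤ n
  · by_cases hf : findOb i c obs ≠ 0
    · -- row i is blocked: loop returns mv; the least blocker at or above i is i itself
      rw [uMoveLoop, dif_pos hle, if_pos hf]
      obtain ⟨o, ho, h0, h1⟩ := (findOb_ne_zero_iff i c obs).mp hf
      have hi_mem : i ∈ blockersFrom n c i obs :=
        mem_blockersFrom.mpr ⟨o, ho, h0, h1, le_refl i, hle⟩
      have hne : blockersFrom n c i obs ≠ [] := fun h => by simp [h] at hi_mem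
      obtain ⟨m, hm⟩ : ∃ m, PySem.List.min? (blockersFrom n c i obs) (fun x => x) = some m := by
        cases hmm : PySem.List.min? (blockersFrom n c i obs) (fun x => x) with
        | none => exact absurd ((PySem.List.min?_eq_none_iff _ _).mp hmm) hne
        | some m => exact ⟨m, rfl⟩
      have hmem := PySem.List.min?_mem hm
      have hub : i ≤ m := (mem_blockersFrom.mp hmem).choose_spec.2.2.2.1
      have hlb : m ≤ i := PySem.List.min?_isMin hm i hi_mem
      rw [hm]
      simp only [upCount]
      omega
    · -- row i free: one more step; the blockers at or above i are those at or above i+1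
      rw [not_not] at hf
      rw [uMoveLoop, dif_pos hle, if_neg (by simpa using hf)]
      have hstep : blockersFrom n c i obs = blockersFrom n c (i + 1) obs := by
        unfold blockersFrom
        congr 1
        refine List.filter_congr fun o ho => ?_
        by_cases hc : PySem.List.pyGetD o 1 0 = c
        · have hrow : PySem.List.pyGetD o 0 0 ≠ i := by
            intro hr
            exact (findOb_ne_zero_iff i c obs).mpr ⟨o, ho, hr, hc⟩ hf
          have : (i ≤ PySem.List.pyGetD o 0 0) ↔ (i + 1 ≤ PySem.List.pyGetD o 0 0) := by omega
          simp [hc, this]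
        · have : (PySem.List.pyGetD o 1 0 == c) = false := by simpa using hc
          simp [this]
      rw [ih (n + 1 - (i + 1)).toNat (by omega) (i + 1) (mv + 1) rfl, hstep]
      cases hm : PySem.List.min? (blockersFrom n c (i + 1) obs) (fun x => x) with
      | some m => simp only [upCount]; omega
      | none => simp only [upCount]; omega
  · -- past the board: loop returns mv and there are no blockers
    rw [uMoveLoop, dif_neg hle]
    have hempty : blockersFrom n c i obs = [] := by
      rw [List.eq_nil_iff_forall_not_mem]
      intro x hx
      obtain ⟨o, _, _, _, h2, h3⟩ := mem_blockersFrom.mp hx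
      omega
    rw [hempty, (PySem.List.min?_eq_none_iff _ _).mpr rfl]
    simp only [upCount]
    omega

theorem blockers_shift (n r0 c : Int) (obs : List (List Int)) :
    (obs.filter (fun o =>
        PySem.List.pyGetD o 1 0 == c &&
        (r0 < PySem.List.pyGetD o 0 0 && PySem.List.pyGetD o 0 0 ≤ n))).map
      (fun o => PySem.List.pyGetD o 0 0) = blockersFrom n c (r0 + 1) obs := by
  unfold blockersFrom
  have h : List.filter (fun o =>
        PySem.List.pyGetD o 1 0 == c &&
        (decide (r0 < PySem.List.pyGetD o 0 0) && decide (PySem.List.pyGetD o 0 0 ≤ n))) obs =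
      List.filter (fun o =>
        PySem.List.pyGetD o 1 0 == c &&
        (decide (r0 + 1 ≤ PySem.List.pyGetD o 0 0) && decide (PySem.List.pyGetD o 0 0 ≤ n))) obs := by
    apply List.filter_congr
    intro o _
    have h2 : decide (r0 < PySem.List.pyGetD o 0 0) = decide (r0 + 1 ≤ PySem.List.pyGetD o 0 0) :=
      decide_eq_decide.mpr (by omega)
    rw [h2]
  rw [h]

-- ===== VERDICT (by name: the statement is the Claim_ definition above) =====
theorem uMove_spec : Claim_equal_uMove := by
  intro n qp obs _ _
  unfold Spec_uMove uMove uMove_alt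
  rw [loop_eq, blockers_shift]
  cases PySem.List.min? (blockersFrom n (PySem.List.pyGetD qp 1 0) (PySem.List.pyGetD qp 0 0 + 1) obs) (fun x => x) with
  | some m => simp only [upCount]; omega
  | none => simp only [upCount]; omega
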